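-- pv_equiv track=rewrite | github.com/Kolotose/lab0_task2 | puzzle.py | rows_check
-- ===== SOURCE A (Python) =====
-- def rows_check(board: list):
--     """
--     Used in check_numbers()
--
--     Checks if the numbers in same rows are different
--
--     >>> rows_check(["**** ****", "***1 ****", "**  3****", \
--                     "* 4 1****", "     9 5 ", " 6  83  *", \
--                     "3   1  **", "  8  2***", "  2  ****"])
--     True
--     """
--     for line in board:
--         numbers_in_line = []
--         for element in line:
--             if element.isnumeric():
--                 numbers_in_line.append(element)
--
--         if check_uniqueness(numbers_in_line) == False:
--             return False
--
--     return True
--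
-- def check_uniqueness(list_of_numbers: list):
--     """
--     Used in color_check(), rows_check(), columns_check()
--
--     Checks if the numbers in list are unique
--
--     >>> check_uniqueness(['1', '2', '3', '4', '6', '7', '8', '9'])
--     True
--     >>> check_uniqueness(['1', '2', '3', '4', '5', '6', '7', '1'])
--     False
--     """
--     for number in range(1, 10):
--         amount = list_of_numbers.count(str(number))
--         if amount > 1:
--             return False
--
--     return True
-- ===== SOURCE B (Python) =====
-- def rows_check(board: list):
--     """Single pass per line with a seen-set instead of nine count() scans per line."""
--     for line in board:
--         seen = set()
--         for ch in line:
--             if ch in '123456789':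
--                 if ch in seen:
--                     return False
--                 seen.add(ch)
--     return True
-- ===== Notes on version B (the rewrite author's own statement) =====
-- stated objective: faster
-- what changed: Replaces A's per-line filter pass plus nine list.count scans over '1'..'9' with a single pass per line maintaining a set of seen digits, returning False on the first repeat.
import Mathlib
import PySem

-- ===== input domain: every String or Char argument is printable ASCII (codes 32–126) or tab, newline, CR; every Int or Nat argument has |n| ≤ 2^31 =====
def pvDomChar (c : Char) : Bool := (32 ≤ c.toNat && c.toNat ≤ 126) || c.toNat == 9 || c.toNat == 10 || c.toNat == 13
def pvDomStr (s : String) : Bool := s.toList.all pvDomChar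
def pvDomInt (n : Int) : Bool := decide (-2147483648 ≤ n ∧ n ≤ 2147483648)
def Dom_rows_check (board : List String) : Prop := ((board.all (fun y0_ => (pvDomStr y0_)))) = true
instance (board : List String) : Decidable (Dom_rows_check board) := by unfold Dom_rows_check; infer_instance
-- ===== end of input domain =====

-- B replaces A's per-line filter pass plus nine count() scans with one pass per line over a seen-set (return value only).

-- ===== PORT A =====
-- check_uniqueness: 'for number in range(1, 10): if list.count(str(number)) > 1: return False'.
-- Elements of numbers_in_line are single characters; str(number) for 1 ≤ number ≤ 9 is the single
-- digit character, ported as Char.ofNat (48 + number.toNat).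
def check_uniqueness_go (list_of_numbers : List Char) : List Int → Bool
  | [] => true
  | number :: rest =>
      if 1 < PySem.List.count list_of_numbers (Char.ofNat (48 + number.toNat)) then false
      else check_uniqueness_go list_of_numbers rest

def check_uniqueness (list_of_numbers : List Char) : Bool :=
  check_uniqueness_go list_of_numbers (PySem.List.pyRange 1 10 1)

-- element.isnumeric(): on the printable-ASCII domain Dom_rows_check this is exactly the
-- decimal digits '0'-'9', i.e. PySem.Chars.isdigit.
def rows_check : List String → Bool
  | [] => true
  | line :: rest =>
      let numbers_in_line :=
        line.toList.foldl (fun acc element =>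
          if PySem.Chars.isdigit element then acc ++ [element] else acc) []
      if check_uniqueness numbers_in_line == false then false
      else rows_check rest

-- ===== PORT B =====
-- 'ch in "123456789"' for a single character ch is membership in its characters.
def pvIsDig (c : Char) : Bool := ("123456789".toList).contains c

def pvAltLine (seen : List Char) : List Char → Bool
  | [] => true
  | ch :: rest =>
      if pvIsDig ch then
        if seen.contains ch then false
        else pvAltLine (PySem.Set.add seen ch) rest
      else pvAltLine seen rest

def rows_check_alt : List String → Bool
  | [] => true
  | line :: rest => pvAltLine [] line.toList && rows_check_alt rest

-- ===== PRECONDITION & SPEC =====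
def Spec_rows_check (board : List String) (out : Bool) : Prop := out = rows_check_alt board
instance (board : List String) (out : Bool) : Decidable (Spec_rows_check board out) := by unfold Spec_rows_check; infer_instance

-- ===== CLAIM (what is proved, stated in full; the proofs are below) =====
def Claim_equal_rows_check : Prop := ∀ (board : List String), Dom_rows_check board → Spec_rows_check board (rows_check board)

-- ===== LEMMAS AND PROOFS =====

-- B's scan returns true iff the '1'..'9' characters of the line are pairwise distinct
-- and none of them was already seen.
theorem pvAltLine_eq_true_iff (cs : List Char) (seen : List Char) :
    pvAltLine seen cs = true ↔
      ((cs.filter pvIsDig).Nodup ∧ ∀ c ∈ cs.filter pvIsDig, c ∉ seen) := by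
  induction cs generalizing seen with
  | nil => simp [pvAltLine]
  | cons ch rest ih =>
      by_cases hd : pvIsDig ch = true
      · rw [List.filter_cons_of_pos hd]
        by_cases hs : ch ∈ seen
        · have hs' : seen.contains ch = true := by simpa using hs
          simp [pvAltLine, hd, hs]
        · have hs' : seen.contains ch = false := by simpa using hs
          rw [pvAltLine, hd, if_pos rfl, hs', if_neg (by simp), ih]
          have hadd : PySem.Set.add seen ch = seen ++ [ch] := by
            simp [PySem.Set.add, hs]
          rw [hadd]
          simp only [List.nodup_cons, List.mem_cons]
          constructor
          · rintro ⟨hn, hall⟩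
            refine ⟨⟨fun hm => by simpa using (hall ch hm), hn⟩, ?_⟩
            rintro c (rfl | hc)
            · exact hs
            · have := hall c hc
              simp at this
              exact this.1
          · rintro ⟨⟨hnm, hn⟩, hall⟩
            refine ⟨hn, fun c hc => ?_⟩
            have hne : c ≠ ch := fun h => hnm (h ▸ hc)
            simp [hall c (Or.inr hc), hne]
      · rw [List.filter_cons_of_neg hd, pvAltLine, if_neg hd, ih]

theorem pvDigit_isdigit (d : Char) (hd : pvIsDig d = true) :
    PySem.Chars.isdigit d = true := by
  simp [pvIsDig] at hd
  rcases hd with rfl | rfl | rfl | rfl | rfl | rfl | rfl | rfl | rfl <;> decide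

-- every '1'..'9' character is Char.ofNat (48 + n) for some n in A's range
theorem pvDigit_ofRange (d : Char) (hd : pvIsDig d = true) :
    ∃ n ∈ ([1,2,3,4,5,6,7,8,9] : List Int), Char.ofNat (48 + n.toNat) = d := by
  simp [pvIsDig] at hd
  rcases hd with rfl | rfl | rfl | rfl | rfl | rfl | rfl | rfl | rfl
  · exact ⟨1, by decide, by decide⟩
  · exact ⟨2, by decide, by decide⟩
  · exact ⟨3, by decide, by decide⟩
  · exact ⟨4, by decide, by decide⟩
  · exact ⟨5, by decide, by decide⟩
  · exact ⟨6, by decide, by decide⟩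
  · exact ⟨7, by decide, by decide⟩
  · exact ⟨8, by decide, by decide⟩
  · exact ⟨9, by decide, by decide⟩

theorem pvRange_dig : ∀ n ∈ ([1,2,3,4,5,6,7,8,9] : List Int),
    pvIsDig (Char.ofNat (48 + n.toNat)) = true := by decide

-- unrolling check_uniqueness's early-return loop over the numbers 1..9
theorem check_uniqueness_go_iff (l : List Char) (ns : List Int) :
    check_uniqueness_go l ns = true ↔
      ∀ n ∈ ns, PySem.List.count l (Char.ofNat (48 + n.toNat)) ≤ 1 := by
  induction ns with
  | nil => simp [check_uniqueness_go]
  | cons n ns ih =>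
      rw [check_uniqueness_go]
      split_ifs with h
      · simp only [false_iff]
        intro hall
        exact absurd (hall n (List.mem_cons_self)) (by omega)
      · rw [ih]
        constructor
        · intro hall m hm
          rcases List.mem_cons.mp hm with rfl | hm'
          · omega
          · exact hall m hm'
        · intro hall m hm
          exact hall m (List.mem_cons_of_mem _ hm)

-- A's per-line check returns true iff every digit '1'..'9' occurs at most once.
theorem check_uniqueness_eq_true_iff (l : List Char) :
    check_uniqueness l = true ↔ ∀ d, pvIsDig d = true → l.count d ≤ 1 := by
  have hr : PySem.List.pyRange 1 10 1 = [1,2,3,4,5,6,7,8,9] := by decide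
  rw [check_uniqueness, hr, check_uniqueness_go_iff]
  constructor
  · intro h d hd
    obtain ⟨n, hn, rfl⟩ := pvDigit_ofRange d hd
    have := h n hn
    rwa [PySem.List.count_eq] at this
  · intro h n hn
    have := h _ (pvRange_dig n hn)
    rwa [PySem.List.count_eq]

-- The two per-line checks agree on every line.
theorem pvLine_eq (cs : List Char) :
    check_uniqueness (cs.filter PySem.Chars.isdigit) = pvAltLine [] cs := by
  rw [Bool.eq_iff_iff, check_uniqueness_eq_true_iff, pvAltLine_eq_true_iff]
  constructor
  · intro h
    refine ⟨List.nodup_iff_count_le_one.mpr (fun a => ?_), by simp⟩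
    by_cases ha : pvIsDig a = true
    · rw [List.count_filter ha]
      have := h a ha
      rwa [List.count_filter (pvDigit_isdigit a ha)] at this
    · have hnm : a ∉ List.filter pvIsDig cs := by simp [List.mem_filter, ha]
      simp [List.count_eq_zero_of_not_mem hnm]
  · rintro ⟨hn, -⟩ d hd
    have := List.nodup_iff_count_le_one.mp hn d
    rw [List.count_filter hd] at this
    rwa [List.count_filter (pvDigit_isdigit d hd)]

-- ===== VERDICT (by name: the statement is the Claim_ definition above) =====
theorem rows_check_spec : Claim_equal_rows_check := by
  intro board hD
  unfold Spec_rows_check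
  clear hD
  induction board with
  | nil => rfl
  | cons line rest ih =>
      simp only [rows_check, rows_check_alt]
      rw [PySem.List.foldl_append_if_eq_filter, List.nil_append, pvLine_eq]
      cases h : pvAltLine [] line.toList <;> simp [ih]
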